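-- pv_equiv track=rewrite | github.com/GontarRV/Python | tasks28/MaximumDiscount.py | MaximumDiscount
-- ===== SOURCE A (Python) =====
-- from typing import List
--
-- def MaximumDiscount(N: int, price: List[int]) -> int:
--
--     if N < 3:
--         sum_price = 0
--
--     sum_price = 0
--     while N > 2:
--         three_item, price = maximumprice(price)
--         sum_price += min(three_item)
--         N -= 3
--
--     return sum_price
--
-- def maximumprice(price: List[int]):
--
--     three_item =  []
--     for i in range(3):
--         three_item.append(max(price))
--         price.remove(max(price))
--     return three_item, price
-- ===== SOURCE B (Python) =====
-- from typing import List
--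
-- def MaximumDiscount(N: int, price: List[int]) -> int:
--     s = sorted(price, reverse=True)
--     total = 0
--     i = 2
--     while N > 2:
--         total += s[i]
--         i += 3
--         N -= 3
--     return total
-- ===== Notes on version B (the rewrite author's own statement) =====
-- stated objective: faster
-- what changed: A repeatedly scans the list with max() (twice per pick) and remove()s the top three elements each loop round; B sorts once in descending order and sums the elements at indices 2, 5, 8, ... without touching the input list.
import Mathlib
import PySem

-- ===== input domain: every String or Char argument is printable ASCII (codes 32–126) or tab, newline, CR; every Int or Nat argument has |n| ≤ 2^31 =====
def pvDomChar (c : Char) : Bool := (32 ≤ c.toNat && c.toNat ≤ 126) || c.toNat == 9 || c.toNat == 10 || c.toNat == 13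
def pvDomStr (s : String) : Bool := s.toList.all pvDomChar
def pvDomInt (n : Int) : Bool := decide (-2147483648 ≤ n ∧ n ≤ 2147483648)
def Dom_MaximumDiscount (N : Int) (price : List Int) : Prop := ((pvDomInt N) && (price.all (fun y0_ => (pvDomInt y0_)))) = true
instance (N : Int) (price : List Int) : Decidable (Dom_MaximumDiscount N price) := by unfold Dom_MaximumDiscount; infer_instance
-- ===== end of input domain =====

-- B sorts the list once (descending) and walks it at indices 2, 5, 8, …, replacing A's
-- repeated max/remove scans: O(n log n) instead of O(n·k). Return values agree on Pre_;
-- A additionally mutates its `price` argument in place (removes elements), B does not.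


-- ===== PORT A =====
-- one iteration of maximumprice's `for i in range(3)` body:
-- append max(price) to three_item, remove it from price; `none` = Python ValueError (max/remove of empty)
def pvMaxStep (st : List Int × List Int) : Option (List Int × List Int) :=
  match PySem.List.max? st.2 (fun x => x) with
  | none => none
  | some m =>
    match PySem.List.remove? st.2 m with
    | none => none
    | some p' => some (st.1 ++ [m], p')

def maximumprice (price : List Int) : Option (List Int × List Int) :=
  (List.range 3).foldl (fun st _ => st.bind pvMaxStep) (some ([], price))

-- the `while N > 2` loop carrying sum_price
def pvMDLoop (N : Int) (price : List Int) (sum_price : Int) : Int :=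
  if N > 2 then
    match maximumprice price with
    | none => 0  -- Python raises ValueError here; excluded by Pre_
    | some (three_item, price') =>
      match PySem.List.min? three_item (fun x => x) with
      | none => 0  -- unreachable: three_item always has 3 elements
      | some m => pvMDLoop (N - 3) price' (sum_price + m)
  else sum_price
termination_by N.toNat
decreasing_by omega

def MaximumDiscount (N : Int) (price : List Int) : Int :=
  pvMDLoop N price 0

-- ===== PORT B =====
-- the `while N > 2` loop of Source B over the sorted list s, carrying i and total
def pvAltLoop (s : List Int) (N i total : Int) : Int :=
  if N > 2 then
    pvAltLoop s (N - 3) (i + 3) (total + (PySem.List.pyGet? s i).getD 0)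
    -- pyGet? = none is Python's IndexError; excluded by Pre_ (getD 0 is never reached there)
  else total
termination_by N.toNat
decreasing_by omega

def MaximumDiscount_alt (N : Int) (price : List Int) : Int :=
  let s := PySem.List.sorted price (fun x => x) true
  pvAltLoop s N 2 0

-- ===== PRECONDITION & SPEC =====
-- A raises ValueError (max of an empty sequence) iff the loop's N/3 iterations need
-- more than price.length elements; Pre_ admits exactly the inputs where A returns.
def Pre_MaximumDiscount (N : Int) (price : List Int) : Prop :=
  N ≤ 2 ∨ 3 * (N / 3) ≤ (price.length : Int)
instance (N : Int) (price : List Int) : Decidable (Pre_MaximumDiscount N price) := by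
  unfold Pre_MaximumDiscount; infer_instance

def pvWitness_MaximumDiscount : Int × List Int := (7, [5, 1, 4, 2, 9, 3, 8])

def Spec_MaximumDiscount (N : Int) (price : List Int) (out : Int) : Prop := out = MaximumDiscount_alt N price
instance (N : Int) (price : List Int) (out : Int) : Decidable (Spec_MaximumDiscount N price out) := by unfold Spec_MaximumDiscount; infer_instance

-- ===== CLAIM (what is proved, stated in full; the proofs are below) =====
def Claim_equal_MaximumDiscount : Prop := ∀ (N : Int) (price : List Int), Dom_MaximumDiscount N price → Pre_MaximumDiscount N price → Spec_MaximumDiscount N price (MaximumDiscount N price)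

-- ===== LEMMAS AND PROOFS =====

-- foldl max over elements all ≤ x is x
theorem pv_foldl_max_eq (t : List Int) (x : Int) (h : ∀ y ∈ t, y ≤ x) :
    t.foldl max x = x := by
  induction t generalizing x with
  | nil => rfl
  | cons a t ih =>
    have ha : a ≤ x := h a (by simp)
    simp only [List.foldl_cons, max_eq_left ha]
    exact ih x fun y hy => h y (by simp [hy])

-- head of a descending-sorted nonempty list is what Python's max returns
theorem pv_max?_desc (a : Int) (t : List Int)
    (h : List.Pairwise (fun x y => y ≤ x) (a :: t)) :
    PySem.List.max? (a :: t) (fun x => x) = some a := by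
  rw [PySem.List.max?_id_cons]
  have := (List.pairwise_cons.mp h).1
  rw [pv_foldl_max_eq t a this]

-- maximumprice on a descending-sorted list with ≥ 3 elements: the top three and the rest
theorem pv_maximumprice_desc (a b c : Int) (t : List Int)
    (h : List.Pairwise (fun x y => y ≤ x) (a :: b :: c :: t)) :
    maximumprice (a :: b :: c :: t) = some ([a, b, c], t) := by
  have h1 : List.Pairwise (fun x y => y ≤ x) (b :: c :: t) := (List.pairwise_cons.mp h).2
  have h2 : List.Pairwise (fun x y => y ≤ x) (c :: t) := (List.pairwise_cons.mp h1).2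
  simp only [maximumprice, List.range_succ, List.foldl_append, List.foldl_cons,
    List.foldl_nil, List.range_zero, Option.bind]
  simp [pvMaxStep, pv_max?_desc a _ h, pv_max?_desc b _ h1, pv_max?_desc c _ h2,
    PySem.List.remove?_cons_self]

-- maximumprice never fails on a list with ≥ 3 elements, and always removes exactly 3;
-- on permuted lists it yields the SAME three values and permuted remainders.
theorem pv_maxStep_perm (acc l l' : List Int) (hp : l.Perm l') :
    (pvMaxStep (acc, l) = none ∧ pvMaxStep (acc, l') = none) ∨
    ∃ m r r', pvMaxStep (acc, l) = some (acc ++ [m], r) ∧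
      pvMaxStep (acc, l') = some (acc ++ [m], r') ∧ r.Perm r' := by
  cases hm : PySem.List.max? l (fun x => x) with
  | none =>
    have hl : l = [] := (PySem.List.max?_eq_none_iff _ _).mp hm
    subst hl
    have hl' : l' = [] := hp.symm.eq_nil
    subst hl'
    have e : PySem.List.max? ([] : List Int) (fun x : Int => x) = none :=
      (PySem.List.max?_eq_none_iff _ _).mpr rfl
    left
    constructor <;> simp [pvMaxStep, e]
  | some m =>
    cases hm' : PySem.List.max? l' (fun x => x) with
    | none =>
      have hl' : l' = [] := (PySem.List.max?_eq_none_iff _ _).mp hm'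
      subst hl'
      have hl : l = [] := hp.eq_nil
      subst hl
      rw [(PySem.List.max?_eq_none_iff ([] : List Int) (fun x : Int => x)).mpr rfl] at hm
      exact absurd hm (by simp)
    | some m' =>
      have hmem : m ∈ l := PySem.List.max?_mem hm
      have hmem' : m' ∈ l' := PySem.List.max?_mem hm'
      have hmm' : m = m' := le_antisymm
        (PySem.List.max?_isMax hm' m (hp.mem_iff.mp hmem))
        (PySem.List.max?_isMax hm m' (hp.mem_iff.mpr hmem'))
      subst hmm'
      right
      refine ⟨m, l.erase m, l'.erase m, ?_, ?_, hp.erase m⟩ <;>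
        simp [pvMaxStep, hm, hm', PySem.List.remove?_eq_some_erase _ m hmem,
          PySem.List.remove?_eq_some_erase _ m hmem']

theorem pv_maximumprice_perm (l l' : List Int) (hp : l.Perm l') :
    (maximumprice l = none ∧ maximumprice l' = none) ∨
    ∃ three r r', maximumprice l = some (three, r) ∧
      maximumprice l' = some (three, r') ∧ r.Perm r' := by
  simp only [maximumprice, List.range_succ, List.foldl_append, List.foldl_cons,
    List.foldl_nil, List.range_zero, Option.bind]
  rcases pv_maxStep_perm [] l l' hp with ⟨h1, h1'⟩ | ⟨m1, r1, r1', h1, h1', hp1⟩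
  · left; simp [h1, h1']
  · simp only [List.nil_append] at h1 h1'
    simp only [h1, h1']
    rcases pv_maxStep_perm [m1] r1 r1' hp1 with ⟨h2, h2'⟩ | ⟨m2, r2, r2', h2, h2', hp2⟩
    · left; simp [h2, h2']
    · simp only [h2, h2']
      rcases pv_maxStep_perm ([m1] ++ [m2]) r2 r2' hp2 with ⟨h3, h3'⟩ | ⟨m3, r3, r3', h3, h3', hp3⟩
      · left; simp only [List.cons_append, List.nil_append] at h3 h3'; simp [h3, h3']
      · simp only [List.cons_append, List.nil_append] at h3 h3'
        right; exact ⟨[m1, m2, m3], r3, r3', by simp [h3], by simp [h3'], hp3⟩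

-- A's loop is invariant under permutation of the remaining price list
theorem pv_mdLoop_perm (fuel : Nat) (N : Int) (l l' : List Int) (acc : Int)
    (hf : N.toNat ≤ fuel) (hp : l.Perm l') :
    pvMDLoop N l acc = pvMDLoop N l' acc := by
  induction fuel generalizing N l l' acc with
  | zero =>
    have : ¬ N > 2 := by omega
    rw [pvMDLoop, pvMDLoop]; simp [this]
  | succ k ih =>
    by_cases hN : N > 2
    · rw [pvMDLoop, pvMDLoop]
      simp only [hN, if_true]
      rcases pv_maximumprice_perm l l' hp with ⟨h1, h1'⟩ | ⟨three, r, r', h1, h1', hpr⟩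
      · simp [h1, h1']
      · simp only [h1, h1']
        cases hmin : PySem.List.min? three (fun x => x) with
        | none => simp
        | some m => exact ih (N - 3) r r' (acc + m) (by omega) hpr
    · rw [pvMDLoop, pvMDLoop]; simp [hN]

-- pairwise-descending is preserved by drop
theorem pv_pairwise_drop (s : List Int) (j : Nat)
    (h : List.Pairwise (fun x y => y ≤ x) s) :
    List.Pairwise (fun x y => y ≤ x) (s.drop j) :=
  h.sublist (List.drop_sublist j s)

-- core: on a descending-sorted list, A's loop equals B's index walk
theorem pv_loops_agree (fuel : Nat) (N : Int) (s : List Int) (j : Nat) (acc : Int)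
    (hf : N.toNat ≤ fuel)
    (hs : List.Pairwise (fun x y => y ≤ x) s)
    (hlen : N ≤ 2 ∨ 3 * (N / 3) + (j : Int) ≤ (s.length : Int)) :
    pvMDLoop N (s.drop j) acc = pvAltLoop s N ((j : Int) + 2) acc := by
  induction fuel generalizing N j acc with
  | zero =>
    have h2 : ¬ N > 2 := by omega
    rw [pvMDLoop, pvAltLoop]; simp [h2]
  | succ k ih =>
    by_cases hN : N > 2
    · have hlen' : (j : Int) + 3 ≤ (s.length : Int) := by
        rcases hlen with h | h
        · omega
        · have : 3 * (N / 3) ≥ 3 := by omega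
          omega
      -- decompose s.drop j into its first three elements
      have hj2 : j + 2 < s.length := by omega
      have hdj : s.drop j = s[j] :: s[j+1] :: s[j+2] :: s.drop (j + 3) := by
        rw [List.drop_eq_getElem_cons (by omega),
            List.drop_eq_getElem_cons (i := j + 1) (by omega),
            List.drop_eq_getElem_cons (i := j + 2) (by omega)]
      have hpw : List.Pairwise (fun x y => y ≤ x) (s.drop j) := pv_pairwise_drop s j hs
      rw [hdj] at hpw
      have hmp := pv_maximumprice_desc _ _ _ _ hpw
      have hbc : s[j+2] ≤ s[j+1] :=
        ((List.pairwise_cons.mp (List.pairwise_cons.mp hpw).2).1) _ (List.mem_cons_self ..)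
      have hab : s[j+1] ≤ s[j] := ((List.pairwise_cons.mp hpw).1) _ (List.mem_cons_self ..)
      rw [pvMDLoop, pvAltLoop]
      simp only [hN, if_true, hdj, hmp]
      have hmin : PySem.List.min? [s[j], s[j+1], s[j+2]] (fun x => x) = some s[j+2] := by
        rw [show [s[j], s[j+1], s[j+2]] = s[j] :: [s[j+1], s[j+2]] from rfl,
            PySem.List.min?_id_cons]
        simp only [List.foldl_cons, List.foldl_nil]
        congr 1
        omega
      have hget : PySem.List.pyGet? s ((j : Int) + 2) = some s[j+2] := by
        rw [show (j : Int) + 2 = ((j + 2 : Nat) : Int) by push_cast; ring,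
            PySem.List.pyGet?_natCast]
        simp [hj2]
      rw [hmin, hget]
      simp only [Option.getD_some]
      have := ih (N - 3) (j + 3) (acc + s[j+2]) (by omega)
        (by rcases hlen with h | h; · omega
            · have hdiv : (N - 3) / 3 = N / 3 - 1 := by omega
              right; push_cast; omega)
      rw [show ((j : Int) + 2) + 3 = ((j + 3 : Nat) : Int) + 2 by push_cast; ring]
      exact this
    · rw [pvMDLoop, pvAltLoop]; simp [hN]

-- ===== VERDICT (by name: the statement is the Claim_ definition above) =====
theorem MaximumDiscount_spec : Claim_equal_MaximumDiscount := by
  intro N price _ hpre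
  unfold Spec_MaximumDiscount MaximumDiscount MaximumDiscount_alt
  have hperm : price.Perm (PySem.List.sorted price (fun x => x) true) :=
    (PySem.List.sorted_perm price (fun x => x) true).symm
  rw [pv_mdLoop_perm N.toNat N price _ 0 (le_refl _) hperm]
  have := pv_loops_agree N.toNat N (PySem.List.sorted price (fun x => x) true) 0 0
    (le_refl _) (PySem.List.sorted_pairwise_rev price (fun x => x))
    (by rw [PySem.List.length_sorted]
        rcases hpre with h | h
        · left; exact h
        · right; push_cast; omega)
  simpa using this
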